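-- pv_equiv track=rewrite | github.com/Stobelius/DMT_Khovanov | experimental&obsolete/T5T6analysis.py | remove_superstrings
-- ===== SOURCE A (Python) =====
-- def remove_superstrings(string_set):
--     strings = list(string_set)
--     to_remove = set()
--
--     for i in range(len(strings)):
--         for j in range(len(strings)):
--             if i == j:
--                 continue
--             s1, s2 = strings[i], strings[j]
--             if s1 in s2 and len(s1) < len(s2):
--                 to_remove.add(s2)
--             elif s2 in s1 and len(s2) < len(s1):
--                 to_remove.add(s1)
--
--     return set(strings) - to_remove
-- ===== SOURCE B (Python) =====
-- def remove_superstrings(string_set):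
--     members = set(string_set)
--
--     def has_proper_member_substring(s):
--         n = len(s)
--         for i in range(n + 1):
--             for j in range(i, n + 1):
--                 if j - i < n and s[i:j] in members:
--                     return True
--         return False
--
--     return {s for s in members if not has_proper_member_substring(s)}
-- ===== Notes on version B (the rewrite author's own statement) =====
-- stated objective: faster
-- what changed: Instead of testing all O(n^2) ordered pairs of strings with substring search, B builds one hash set of the members and, for each string, checks whether any of its own proper substrings is a member of that set, so the pairwise inner scan disappears.
import Mathlib
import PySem

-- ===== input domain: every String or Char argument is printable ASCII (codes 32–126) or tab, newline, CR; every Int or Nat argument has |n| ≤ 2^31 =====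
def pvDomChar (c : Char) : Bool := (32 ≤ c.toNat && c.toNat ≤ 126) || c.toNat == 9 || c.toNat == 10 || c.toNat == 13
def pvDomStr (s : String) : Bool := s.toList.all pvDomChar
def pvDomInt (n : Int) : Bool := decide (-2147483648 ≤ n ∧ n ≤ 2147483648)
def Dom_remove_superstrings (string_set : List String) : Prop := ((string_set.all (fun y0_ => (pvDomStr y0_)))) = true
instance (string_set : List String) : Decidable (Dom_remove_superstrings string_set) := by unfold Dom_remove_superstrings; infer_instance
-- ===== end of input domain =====

-- B replaces A's all-pairs `in` tests by one hash set of the members and, per string, a scan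
-- of its own substrings against that set (alternative algorithm; return value only, no mutation).

-- ===== PORT A =====
def remove_superstrings (string_set : List String) : List String :=
  let strings := string_set
  let to_remove : PySem.Set String :=
    (PySem.List.pyRange 0 (strings.length : Int)).foldl (fun acc i =>
      (PySem.List.pyRange 0 (strings.length : Int)).foldl (fun acc j =>
        if i == j then acc
        else
          let s1 := PySem.List.pyGetD strings i ""
          let s2 := PySem.List.pyGetD strings j ""
          if PySem.Str.isIn s1 s2 && decide (PySem.Str.len s1 < PySem.Str.len s2) then
            PySem.Set.add acc s2
          else if PySem.Str.isIn s2 s1 && decide (PySem.Str.len s2 < PySem.Str.len s1) then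
            PySem.Set.add acc s1
          else acc) acc)
      PySem.Set.empty
  PySem.Set.diff (PySem.Set.ofList strings) to_remove

-- ===== PORT B =====
def pvHasProperMemberSubstring (members : PySem.Set String) (s : String) : Bool :=
  let n := PySem.Str.len s
  (PySem.List.pyRange 0 (n + 1)).any fun i =>
    (PySem.List.pyRange i (n + 1)).any fun j =>
      decide (j - i < n) && PySem.Set.contains members (PySem.Str.slice s (some i) (some j))

def remove_superstrings_alt (string_set : List String) : List String :=
  let members := PySem.Set.ofList string_set
  members.filter fun s => !pvHasProperMemberSubstring members s

-- ===== PRECONDITION & SPEC =====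
def Spec_remove_superstrings (string_set : List String) (out : List String) : Prop := out = remove_superstrings_alt string_set
instance (string_set : List String) (out : List String) : Decidable (Spec_remove_superstrings string_set out) := by unfold Spec_remove_superstrings; infer_instance

-- ===== CLAIM (what is proved, stated in full; the proofs are below) =====
def Claim_equal_remove_superstrings : Prop := ∀ (string_set : List String), Dom_remove_superstrings string_set → Spec_remove_superstrings string_set (remove_superstrings string_set)

-- ===== LEMMAS AND PROOFS =====

-- "b has a proper substring among the members of L"
def pvProp (L : List String) (b : String) : Prop :=
  ∃ t ∈ L, t.toList <:+: b.toList ∧ t.toList.length < b.toList.length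

-- generic fold-over-Set membership characterisation
theorem pv_mem_foldl {l : List Int} {g : PySem.Set String → Int → PySem.Set String}
    {q : Int → String → Prop}
    (hg : ∀ acc x b, b ∈ g acc x ↔ b ∈ acc ∨ q x b) :
    ∀ acc b, b ∈ l.foldl g acc ↔ b ∈ acc ∨ ∃ x ∈ l, q x b := by
  induction l with
  | nil => simp
  | cons x xs ih =>
    intro acc b
    simp only [List.foldl_cons, ih, hg, List.mem_cons]
    aesop

-- the condition under which iteration (i, j) of A's double loop inserts b
def pvQ (L : List String) (i j : Int) (b : String) : Prop :=
  ¬ i = j ∧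
  (((PySem.Str.isIn (PySem.List.pyGetD L i "") (PySem.List.pyGetD L j "") &&
      decide (PySem.Str.len (PySem.List.pyGetD L i "") < PySem.Str.len (PySem.List.pyGetD L j ""))) = true
     ∧ b = PySem.List.pyGetD L j "") ∨
   ((PySem.Str.isIn (PySem.List.pyGetD L i "") (PySem.List.pyGetD L j "") &&
      decide (PySem.Str.len (PySem.List.pyGetD L i "") < PySem.Str.len (PySem.List.pyGetD L j ""))) = false
     ∧ (PySem.Str.isIn (PySem.List.pyGetD L j "") (PySem.List.pyGetD L i "") &&
      decide (PySem.Str.len (PySem.List.pyGetD L j "") < PySem.Str.len (PySem.List.pyGetD L i ""))) = true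
     ∧ b = PySem.List.pyGetD L i ""))

theorem pvQ_step (L : List String) (i : Int) (acc : PySem.Set String) (j : Int) (b : String) :
    b ∈ (if i == j then acc
        else if PySem.Str.isIn (PySem.List.pyGetD L i "") (PySem.List.pyGetD L j "") &&
            decide (PySem.Str.len (PySem.List.pyGetD L i "") < PySem.Str.len (PySem.List.pyGetD L j "")) then
          PySem.Set.add acc (PySem.List.pyGetD L j "")
        else if PySem.Str.isIn (PySem.List.pyGetD L j "") (PySem.List.pyGetD L i "") &&
            decide (PySem.Str.len (PySem.List.pyGetD L j "") < PySem.Str.len (PySem.List.pyGetD L i "")) then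
          PySem.Set.add acc (PySem.List.pyGetD L i "")
        else acc)
      ↔ b ∈ acc ∨ pvQ L i j b := by
  unfold pvQ
  split_ifs with h1 h2 h3
  · simp_all
  · simp_all [PySem.Set.mem_add]
  · simp only [PySem.Set.mem_add]
    constructor
    · rintro (h | h)
      · exact Or.inl h
      · exact Or.inr ⟨by simpa using h1, Or.inr ⟨by simpa using h2, h3, h⟩⟩
    · rintro (h | ⟨hne, (⟨hc, hb⟩ | ⟨he1, he2, hb⟩)⟩)
      · exact Or.inl h
      · exact absurd hc h2
      · exact Or.inr hb
  · constructor
    · intro h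
      exact Or.inl h
    · rintro (h | ⟨hne, (⟨hc, hb⟩ | ⟨he1, he2, hb⟩)⟩)
      · exact h
      · exact absurd hc h2
      · exact absurd he2 h3

-- characterisation of A's to_remove set
theorem pvA_char (L : List String) (b : String) :
    b ∈ (PySem.List.pyRange 0 (L.length : Int)).foldl (fun acc i =>
      (PySem.List.pyRange 0 (L.length : Int)).foldl (fun acc j =>
        if i == j then acc
        else
          let s1 := PySem.List.pyGetD L i ""
          let s2 := PySem.List.pyGetD L j ""
          if PySem.Str.isIn s1 s2 && decide (PySem.Str.len s1 < PySem.Str.len s2) then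
            PySem.Set.add acc s2
          else if PySem.Str.isIn s2 s1 && decide (PySem.Str.len s2 < PySem.Str.len s1) then
            PySem.Set.add acc s1
          else acc) acc)
      PySem.Set.empty
    ↔ (b ∈ L ∧ pvProp L b) := by
  rw [pv_mem_foldl (q := fun i b => ∃ j ∈ PySem.List.pyRange 0 (L.length : Int), pvQ L i j b)
    (fun acc i b => pv_mem_foldl (q := pvQ L i) (pvQ_step L i) acc b) PySem.Set.empty b]
  simp only [PySem.Set.empty, List.not_mem_nil, false_or, PySem.List.mem_pyRange_one]
  constructor
  · rintro ⟨i, ⟨hi0, hi1⟩, j, ⟨hj0, hj1⟩, hne, hQ⟩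
    rw [PySem.List.pyGetD_eq_getElem L "" hi0 hi1, PySem.List.pyGetD_eq_getElem L "" hj0 hj1] at hQ
    have hsi : L[i.toNat] ∈ L := List.getElem_mem _
    have hsj : L[j.toNat] ∈ L := List.getElem_mem _
    rcases hQ with ⟨hc, hb⟩ | ⟨_, hc, hb⟩
    · rw [Bool.and_eq_true, decide_eq_true_eq, PySem.Str.isIn_iff_infix,
        PySem.Str.len_eq, PySem.Str.len_eq] at hc
      exact ⟨hb ▸ hsj, L[i.toNat], hsi, hb ▸ hc.1, by have := hc.2; subst hb; omega⟩
    · rw [Bool.and_eq_true, decide_eq_true_eq, PySem.Str.isIn_iff_infix,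
        PySem.Str.len_eq, PySem.Str.len_eq] at hc
      exact ⟨hb ▸ hsi, L[j.toNat], hsj, hb ▸ hc.1, by have := hc.2; subst hb; omega⟩
  · rintro ⟨hbL, t, htL, hinf, hlen⟩
    obtain ⟨it, hit, hitv⟩ := List.mem_iff_getElem.mp htL
    obtain ⟨ib, hib, hibv⟩ := List.mem_iff_getElem.mp hbL
    refine ⟨(it : Int), ⟨by positivity, by exact_mod_cast hit⟩,
      (ib : Int), ⟨by positivity, by exact_mod_cast hib⟩, ?_, ?_⟩
    · intro h
      have : it = ib := by exact_mod_cast h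
      subst this
      rw [hitv] at hibv
      subst hibv
      omega
    · left
      rw [PySem.List.pyGetD_eq_getElem L "" (by positivity) (by exact_mod_cast hit),
        PySem.List.pyGetD_eq_getElem L "" (by positivity) (by exact_mod_cast hib)]
      simp only [Int.toNat_natCast, hitv, hibv]
      constructor
      · rw [Bool.and_eq_true, decide_eq_true_eq, PySem.Str.isIn_iff_infix,
          PySem.Str.len_eq, PySem.Str.len_eq]
        exact ⟨hinf, by exact_mod_cast hlen⟩
      · trivial

-- characterisation of B's test
theorem pvB_char (L : List String) (b : String) :
    pvHasProperMemberSubstring (PySem.Set.ofList L) b = true ↔ pvProp L b := by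
  unfold pvHasProperMemberSubstring pvProp
  simp only [List.any_eq_true, PySem.List.mem_pyRange_one, Bool.and_eq_true, decide_eq_true_eq,
    PySem.Set.contains, List.contains_iff_mem, PySem.Set.mem_ofList, PySem.Str.len_eq]
  constructor
  · rintro ⟨i, ⟨hi0, hi1⟩, j, ⟨hij, hj1⟩, hlt, hmem⟩
    refine ⟨_, hmem, ?_, ?_⟩
    · rw [PySem.Str.toList_slice, PySem.Chars.slice_eq_listSlice,
        PySem.List.slice_toNat _ hi0 (le_trans hi0 hij)]
      exact ((List.take_prefix _ _).isInfix).trans ((List.drop_suffix _ _).isInfix)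
    · rw [PySem.Str.toList_slice, PySem.Chars.slice_eq_listSlice,
        PySem.List.slice_toNat _ hi0 (le_trans hi0 hij)]
      rw [List.length_take, List.length_drop]
      omega
  · rintro ⟨t, htL, ⟨pre, suf, hS⟩, hlen⟩
    have hS' : b.toList = pre ++ t.toList ++ suf := hS.symm
    have hn : b.toList.length = pre.length + t.toList.length + suf.length := by
      rw [hS']; simp; omega
    have hsl : PySem.Str.slice b (some (pre.length : Int))
        (some ((pre.length : Int) + (t.toList.length : Int))) = t := by
      rw [← String.toList_inj, PySem.Str.toList_slice, PySem.Chars.slice_eq_listSlice,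
        PySem.List.slice_natCast_add, hS', List.append_assoc, List.drop_left, List.take_left]
    refine ⟨(pre.length : Int), ⟨by positivity, by omega⟩,
      (pre.length : Int) + (t.toList.length : Int), ⟨by omega, by omega⟩, by omega, ?_⟩
    rw [hsl]; exact htL

-- ===== VERDICT (by name: the statement is the Claim_ definition above) =====
theorem remove_superstrings_spec : Claim_equal_remove_superstrings := by
  intro L _
  unfold Spec_remove_superstrings remove_superstrings remove_superstrings_alt
  simp only [PySem.Set.diff]
  apply List.filter_congr
  intro b hb
  have hbL : b ∈ L := (PySem.Set.mem_ofList L b).mp hb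
  congr 1
  rw [Bool.eq_iff_iff, PySem.Set.contains, List.contains_iff_mem, pvA_char, pvB_char]
  exact ⟨fun h => h.2, fun h => ⟨hbL, h⟩⟩
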